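-- pv_equiv track=rewrite | github.com/nina-mir/w3-python-excercises | string_exercises.py | delete_nth_char
-- ===== SOURCE A (Python) =====
-- def delete_nth_char(n, str):
--     index = 0
--     new_str = ''
--     if str:
--         for c in str:
--             index += 1
--             if index == n:
--                 pass
--             else:
--                 new_str = new_str + c
--         return new_str
--     else:
--         return "Empty strings needs to operations!"
-- ===== SOURCE B (Python) =====
-- def delete_nth_char(n, str):
--     if not str:
--         return "Empty strings needs to operations!"
--     if n < 1:
--         return str
--     return str[:n-1] + str[n:]
-- ===== Notes on version B (the rewrite author's own statement) =====
-- stated objective: idiomatic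
-- what changed: Replaces the character-by-character loop with quadratic string concatenation by two closed-form slices str[:n-1] + str[n:] after an empty-string check and an n < 1 guard (1-based out-of-range indices are a no-op, as in A).
import Mathlib
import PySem

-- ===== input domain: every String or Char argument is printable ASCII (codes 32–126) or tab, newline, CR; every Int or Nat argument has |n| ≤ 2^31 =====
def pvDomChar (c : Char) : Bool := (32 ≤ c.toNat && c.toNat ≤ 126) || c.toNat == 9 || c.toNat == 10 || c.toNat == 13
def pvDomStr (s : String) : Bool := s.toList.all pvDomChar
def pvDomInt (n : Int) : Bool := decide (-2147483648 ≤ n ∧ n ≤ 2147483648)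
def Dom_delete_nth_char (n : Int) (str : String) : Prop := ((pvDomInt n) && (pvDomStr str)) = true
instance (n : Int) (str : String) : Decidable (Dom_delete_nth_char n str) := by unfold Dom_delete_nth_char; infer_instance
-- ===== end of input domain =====

-- B replaces A's 1-indexed character-accumulating loop by two closed-form slices (idiomatic rewrite).

-- ===== PORT A =====
-- the loop body: index += 1; if index == n: pass else: new_str = new_str + c
def delete_nth_char (n : Int) (str : String) : String :=
  let index : Int := 0
  let new_str : List Char := []
  if str ≠ "" then
    String.ofList (str.toList.foldl
      (fun (st : Int × List Char) c =>
        if st.1 + 1 = n then (st.1 + 1, st.2) else (st.1 + 1, st.2 ++ [c]))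
      (index, new_str)).2
  else "Empty strings needs to operations!"

-- ===== PORT B =====
def delete_nth_char_alt (n : Int) (str : String) : String :=
  if str = "" then "Empty strings needs to operations!"
  else if n < 1 then str
  else String.ofList (PySem.List.slice str.toList none (some (n - 1)) ++
                      PySem.List.slice str.toList (some n) none)

-- ===== PRECONDITION & SPEC =====
def Spec_delete_nth_char (n : Int) (str : String) (out : String) : Prop := out = delete_nth_char_alt n str
instance (n : Int) (str : String) (out : String) : Decidable (Spec_delete_nth_char n str out) := by unfold Spec_delete_nth_char; infer_instance

-- ===== CLAIM (what is proved, stated in full; the proofs are below) =====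
def Claim_equal_delete_nth_char : Prop := ∀ (n : Int) (str : String), Dom_delete_nth_char n str → Spec_delete_nth_char n str (delete_nth_char n str)

-- ===== LEMMAS AND PROOFS =====

-- A's loop with the running index generalized
def pvLoopA (n : Int) (i0 : Int) (acc : List Char) (l : List Char) : Int × List Char :=
  l.foldl (fun (st : Int × List Char) c =>
    if st.1 + 1 = n then (st.1 + 1, st.2) else (st.1 + 1, st.2 ++ [c])) (i0, acc)

theorem pvLoopA_nil (n i0 : Int) (acc : List Char) : pvLoopA n i0 acc [] = (i0, acc) := rfl

theorem pvLoopA_cons (n i0 : Int) (acc : List Char) (c : Char) (cs : List Char) :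
    pvLoopA n i0 acc (c :: cs) =
      if i0 + 1 = n then pvLoopA n (i0 + 1) acc cs else pvLoopA n (i0 + 1) (acc ++ [c]) cs := by
  unfold pvLoopA
  rw [List.foldl_cons]
  split_ifs with h <;> simp [h]

theorem pvLoopA_append (n i0 : Int) (acc : List Char) (l : List Char) :
    pvLoopA n i0 acc l = ((pvLoopA n i0 [] l).1, acc ++ (pvLoopA n i0 [] l).2) := by
  induction l generalizing i0 acc with
  | nil => simp [pvLoopA_nil]
  | cons c cs ih =>
    rw [pvLoopA_cons, pvLoopA_cons]
    split_ifs with h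
    · rw [ih (i0 + 1) acc, ih (i0 + 1) []]
    · rw [ih (i0 + 1) (acc ++ [c]), ih (i0 + 1) ([] ++ [c])]
      simp

-- when the target index is already passed (or never reached), the loop copies the list
theorem pvLoopA_skip (n i0 : Int) (l : List Char) (h : n ≤ i0) :
    (pvLoopA n i0 [] l).2 = l := by
  induction l generalizing i0 with
  | nil => simp [pvLoopA_nil]
  | cons c cs ih =>
    rw [pvLoopA_cons]
    have hne : ¬ (i0 + 1 = n) := by omega
    rw [if_neg hne, pvLoopA_append]
    simp [ih (i0 + 1) (by omega)]

-- when the target lies ahead: keep the next (n - i0 - 1) chars, skip char n, copy the rest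
theorem pvLoopA_hit (n i0 : Int) (l : List Char) (h : i0 < n) :
    (pvLoopA n i0 [] l).2 = l.take (n - i0 - 1).toNat ++ l.drop (n - i0).toNat := by
  induction l generalizing i0 with
  | nil => simp [pvLoopA_nil]
  | cons c cs ih =>
    rw [pvLoopA_cons]
    by_cases he : i0 + 1 = n
    · have h1 : (n - i0 - 1).toNat = 0 := by omega
      have h2 : (n - i0).toNat = 1 := by omega
      rw [if_pos he, h1, h2]
      simp [pvLoopA_skip n (i0 + 1) cs (by omega)]
    · rw [if_neg he, pvLoopA_append, ih (i0 + 1) (by omega)]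
      have h1 : (n - i0 - 1).toNat = (n - (i0 + 1) - 1).toNat + 1 := by omega
      have h2 : (n - i0).toNat = (n - (i0 + 1)).toNat + 1 := by omega
      rw [h1, h2]
      simp

-- ===== VERDICT (by name: the statement is the Claim_ definition above) =====
theorem delete_nth_char_spec : Claim_equal_delete_nth_char := by
  intro n str _
  unfold Spec_delete_nth_char delete_nth_char delete_nth_char_alt
  by_cases hs : str = ""
  · simp [hs]
  · simp only [hs, if_false, ne_eq, not_false_eq_true, if_true]
    have hloop : (str.toList.foldl
        (fun (st : Int × List Char) c =>
          if st.1 + 1 = n then (st.1 + 1, st.2) else (st.1 + 1, st.2 ++ [c]))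
        ((0 : Int), ([] : List Char))) = pvLoopA n 0 [] str.toList := rfl
    by_cases hn : n < 1
    · rw [hloop, pvLoopA_skip n 0 str.toList (by omega)]
      simp [hn]
    · simp only [hn, if_false]
      rw [hloop, pvLoopA_hit n 0 str.toList (by omega),
          PySem.List.slice_to str.toList (show (0:Int) ≤ n - 1 by omega),
          PySem.List.slice_from str.toList (show (0:Int) ≤ n by omega)]
      simp
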